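-- pv_equiv track=rewrite | github.com/PaulHarder2/HarderWare | WxServices/src/WxVis/metar_plot.py | parse_sky_oktas
-- ===== SOURCE A (Python) =====
-- _COVERAGE_OKTAS: dict[str, int] = {
--     "SKC": 0,
--     "CLR": 0,
--     "NCD": 0,
--     "NSC": 0,
--     "FEW": 1,   # 1–2/8
--     "SCT": 3,   # 3–4/8
--     "BKN": 6,   # 5–7/8
--     "OVC": 8,
--     "VV":  8,   # vertical visibility — sky obscured
-- }
--
-- _COVERAGE_ORDER = ["OVC", "VV", "BKN", "SCT", "FEW", "SKC", "CLR", "NCD", "NSC"]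
--
-- def parse_sky_oktas(raw_sky: str | None) -> int:
--     """
--     Return the WMO okta value (0–8) for the most significant sky layer in the
--     raw sky-condition string (e.g. ``"FEW030 SCT060 BKN120"``).
--
--     Returns 0 (clear) when *raw_sky* is None or empty.
--     """
--     if not isinstance(raw_sky, str) or not raw_sky:
--         return 0
--     tokens = raw_sky.upper().split()
--     for cover_token in _COVERAGE_ORDER:
--         for token in tokens:
--             if token.startswith(cover_token):
--                 return _COVERAGE_OKTAS[cover_token]
--     return 0
-- ===== SOURCE B (Python) =====
-- _COVERAGE_OKTAS: dict[str, int] = {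
--     "SKC": 0,
--     "CLR": 0,
--     "NCD": 0,
--     "NSC": 0,
--     "FEW": 1,
--     "SCT": 3,
--     "BKN": 6,
--     "OVC": 8,
--     "VV":  8,
-- }
--
-- _COVERAGE_ORDER = ["OVC", "VV", "BKN", "SCT", "FEW", "SKC", "CLR", "NCD", "NSC"]
--
--
-- def parse_sky_oktas(raw_sky):
--     """Single pass over the tokens, keeping the maximum okta seen."""
--     if not isinstance(raw_sky, str) or not raw_sky:
--         return 0
--     best = 0
--     for token in raw_sky.upper().split():
--         for prefix in _COVERAGE_ORDER:
--             if token.startswith(prefix):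
--                 best = max(best, _COVERAGE_OKTAS[prefix])
--                 break
--     return best
-- ===== Notes on version B (the rewrite author's own statement) =====
-- stated objective: idiomatic
-- what changed: A scans the fixed priority order and early-returns the okta of the first coverage any token starts with (restarting over all tokens for each coverage); B makes one accumulator pass over the tokens, classifying each token once and keeping best = max(best, okta); they agree because the priority order is exactly okta-descending.
import Mathlib
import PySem

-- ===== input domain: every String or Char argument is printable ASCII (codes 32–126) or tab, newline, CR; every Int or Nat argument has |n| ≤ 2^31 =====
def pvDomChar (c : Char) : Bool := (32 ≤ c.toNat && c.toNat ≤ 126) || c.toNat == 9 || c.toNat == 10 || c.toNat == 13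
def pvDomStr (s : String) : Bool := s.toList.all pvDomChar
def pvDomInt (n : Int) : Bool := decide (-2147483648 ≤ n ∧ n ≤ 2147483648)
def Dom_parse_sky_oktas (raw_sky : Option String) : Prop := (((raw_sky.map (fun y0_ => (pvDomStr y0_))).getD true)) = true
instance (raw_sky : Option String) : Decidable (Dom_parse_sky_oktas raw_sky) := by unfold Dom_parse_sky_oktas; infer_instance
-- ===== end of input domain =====

-- B replaces A's priority-order scan with a single max-accumulator pass over the tokens (idiomatic, not faster).

-- ===== PORT A =====
-- _COVERAGE_OKTAS
def pvOktas : PySem.Dict String Int :=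
  PySem.Dict.ofList [("SKC",0),("CLR",0),("NCD",0),("NSC",0),("FEW",1),("SCT",3),("BKN",6),("OVC",8),("VV",8)]

-- _COVERAGE_ORDER
def pvOrder : List String := ["OVC","VV","BKN","SCT","FEW","SKC","CLR","NCD","NSC"]

-- A's nested loop: for cover in order, for token in tokens: first token starting with cover
-- returns oktas[cover].  The inner loop's returned value depends only on whether SOME token
-- matches, so it is `tokens.any`; every cover_token is a key of the dict, so `.getD _ 0` is
-- exactly Python's d[k] here.
def pvAOuter (tokens : List String) : List String → Int
  | [] => 0
  | c :: rest =>
      if tokens.any (fun t => PySem.Str.startswith t c) then pvOktas.getD c 0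
      else pvAOuter tokens rest

def parse_sky_oktas (raw_sky : Option String) : Int :=
  match raw_sky with
  | none => 0
  | some s =>
      if s = "" then 0
      else pvAOuter (PySem.Str.split₀ (PySem.Str.upper s)) pvOrder

-- ===== PORT B =====
-- B's inner loop: first prefix of _COVERAGE_ORDER the token starts with (break), else no update.
def pvOktaOf (token : String) : Int :=
  match pvOrder.find? (fun c => PySem.Str.startswith token c) with
  | some c => pvOktas.getD c 0
  | none => 0

def parse_sky_oktas_alt (raw_sky : Option String) : Int :=
  match raw_sky with
  | none => 0
  | some s =>
      if s = "" then 0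
      else (PySem.Str.split₀ (PySem.Str.upper s)).foldl (fun best t => max best (pvOktaOf t)) 0

-- ===== PRECONDITION & SPEC =====
def Spec_parse_sky_oktas (raw_sky : Option String) (out : Int) : Prop := out = parse_sky_oktas_alt raw_sky
instance (raw_sky : Option String) (out : Int) : Decidable (Spec_parse_sky_oktas raw_sky out) := by unfold Spec_parse_sky_oktas; infer_instance

-- ===== CLAIM (what is proved, stated in full; the proofs are below) =====
def Claim_equal_parse_sky_oktas : Prop := ∀ (raw_sky : Option String), Dom_parse_sky_oktas raw_sky → Spec_parse_sky_oktas raw_sky (parse_sky_oktas raw_sky)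

-- ===== LEMMAS AND PROOFS =====

lemma pvA_nonneg (ts : List String) : 0 ≤ pvAOuter ts pvOrder ∧ pvAOuter ts pvOrder ≤ 8 := by
  simp only [pvOrder, pvAOuter]
  split_ifs <;> decide

lemma pvA_cons (t : String) (ts : List String) :
    pvAOuter (t :: ts) pvOrder = max (pvOktaOf t) (pvAOuter ts pvOrder) := by
  have gOVC : pvOktas.getD "OVC" 0 = 8 := by decide
  have gVV : pvOktas.getD "VV" 0 = 8 := by decide
  have gBKN : pvOktas.getD "BKN" 0 = 6 := by decide
  have gSCT : pvOktas.getD "SCT" 0 = 3 := by decide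
  have gFEW : pvOktas.getD "FEW" 0 = 1 := by decide
  have gSKC : pvOktas.getD "SKC" 0 = 0 := by decide
  have gCLR : pvOktas.getD "CLR" 0 = 0 := by decide
  have gNCD : pvOktas.getD "NCD" 0 = 0 := by decide
  have gNSC : pvOktas.getD "NSC" 0 = 0 := by decide
  simp only [pvOrder, pvAOuter, pvOktaOf, List.any_cons]
  by_cases h0 : PySem.Chars.startswith t.toList ['O', 'V', 'C'] = true
  · simp [h0, List.find?, gOVC, gVV, gBKN, gSCT, gFEW, gSKC, gCLR, gNCD, gNSC]
    split_ifs <;> omega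
  · by_cases h1 : PySem.Chars.startswith t.toList ['V', 'V'] = true
    · simp [h0, h1, List.find?, gOVC, gVV, gBKN, gSCT, gFEW, gSKC, gCLR, gNCD, gNSC]
      split_ifs <;> omega
    · by_cases h2 : PySem.Chars.startswith t.toList ['B', 'K', 'N'] = true
      · simp [h0, h1, h2, List.find?, gOVC, gVV, gBKN, gSCT, gFEW, gSKC, gCLR, gNCD, gNSC]
        split_ifs <;> omega
      · by_cases h3 : PySem.Chars.startswith t.toList ['S', 'C', 'T'] = true
        · simp [h0, h1, h2, h3, List.find?, gOVC, gVV, gBKN, gSCT, gFEW, gSKC, gCLR, gNCD, gNSC]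
          split_ifs <;> omega
        · by_cases h4 : PySem.Chars.startswith t.toList ['F', 'E', 'W'] = true
          · simp [h0, h1, h2, h3, h4, List.find?, gOVC, gVV, gBKN, gSCT, gFEW, gSKC, gCLR, gNCD, gNSC]
            split_ifs <;> omega
          · by_cases h5 : PySem.Chars.startswith t.toList ['S', 'K', 'C'] = true
            · simp [h0, h1, h2, h3, h4, h5, List.find?, gOVC, gVV, gBKN, gSCT, gFEW, gSKC, gCLR, gNCD, gNSC]
              split_ifs <;> omega
            · by_cases h6 : PySem.Chars.startswith t.toList ['C', 'L', 'R'] = true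
              · simp [h0, h1, h2, h3, h4, h5, h6, List.find?, gOVC, gVV, gBKN, gSCT, gFEW, gSKC, gCLR, gNCD, gNSC]
                split_ifs <;> omega
              · by_cases h7 : PySem.Chars.startswith t.toList ['N', 'C', 'D'] = true
                · simp [h0, h1, h2, h3, h4, h5, h6, h7, List.find?, gOVC, gVV, gBKN, gSCT, gFEW, gSKC, gCLR, gNCD, gNSC]
                  split_ifs <;> omega
                · by_cases h8 : PySem.Chars.startswith t.toList ['N', 'S', 'C'] = true
                  · simp [h0, h1, h2, h3, h4, h5, h6, h7, h8, List.find?, gOVC, gVV, gBKN, gSCT, gFEW, gSKC, gCLR, gNCD, gNSC]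
                    split_ifs <;> omega
                  · simp [h0, h1, h2, h3, h4, h5, h6, h7, h8, List.find?, gOVC, gVV, gBKN, gSCT, gFEW, gSKC, gCLR, gNCD, gNSC]
                    split_ifs <;> omega

lemma pvFoldl_eq (ts : List String) (b : Int) (hb : 0 ≤ b) :
    ts.foldl (fun best t => max best (pvOktaOf t)) b = max b (pvAOuter ts pvOrder) := by
  induction ts generalizing b with
  | nil => simp [pvAOuter, pvOrder]; omega
  | cons t ts ih =>
      have h1 := pvA_nonneg ts
      rw [List.foldl_cons, ih _ (le_max_of_le_left hb |>.trans (le_refl _)), pvA_cons]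
      omega

-- ===== VERDICT (by name: the statement is the Claim_ definition above) =====
theorem parse_sky_oktas_spec : Claim_equal_parse_sky_oktas := by
  intro raw_sky _
  unfold Spec_parse_sky_oktas parse_sky_oktas parse_sky_oktas_alt
  cases raw_sky with
  | none => rfl
  | some s =>
      by_cases hs : s = "" <;> simp [hs]
      rw [pvFoldl_eq _ 0 le_rfl]
      have := pvA_nonneg (PySem.Str.split₀ (PySem.Str.upper s))
      omega
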